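-- pv_equiv track=rewrite | github.com/mbailey/voicemode | voice_mode/connect/watcher.py | diff_user_state
-- ===== SOURCE A (Python) =====
-- from typing import Callable, Optional
--
-- def diff_user_state(
--     prev: dict, curr: dict
-- ) -> list[tuple[str, str, Optional[str]]]:
--     """Compare two user state snapshots and return a list of changes.
--
--     Returns list of (change_type, username, detail) tuples where
--     change_type is one of: added, removed, subscribed, unsubscribed, changed.
--     """
--     changes = []
--
--     added = set(curr) - set(prev)
--     removed = set(prev) - set(curr)
--     common = set(curr) & set(prev)
--
--     for name in sorted(added):
--         changes.append(("added", name, None))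
--
--     for name in sorted(removed):
--         changes.append(("removed", name, None))
--
--     for name in sorted(common):
--         if curr[name] != prev[name]:
--             old_sub = prev[name]["subscribed"]
--             new_sub = curr[name]["subscribed"]
--             if new_sub and not old_sub:
--                 changes.append(("subscribed", name, None))
--             elif old_sub and not new_sub:
--                 changes.append(("unsubscribed", name, None))
--             else:
--                 changes.append(("changed", name, None))
--
--     return changes
-- ===== SOURCE B (Python) =====
-- def _classify(pd, cd):
--     old_sub = pd["subscribed"]
--     new_sub = cd["subscribed"]
--     if new_sub and not old_sub:
--         return "subscribed"
--     if old_sub and not new_sub: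
--         return "unsubscribed"
--     return "changed"
--
--
-- def diff_user_state(prev, curr):
--     added, removed, changed = [], [], []
--     for name in sorted(set(prev) | set(curr)):
--         if name not in prev:
--             added.append(("added", name, None))
--         elif name not in curr:
--             removed.append(("removed", name, None))
--         elif curr[name] != prev[name]:
--             changed.append((_classify(prev[name], curr[name]), name, None))
--     return added + removed + changed
-- ===== Notes on version B (the rewrite author's own statement) =====
-- stated objective: alternative
-- what changed: One merged sorted pass over the union of both key sets routing each name by membership into three accumulator lists, instead of three separate set operations each sorted and looped over independently.
import Mathlib
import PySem

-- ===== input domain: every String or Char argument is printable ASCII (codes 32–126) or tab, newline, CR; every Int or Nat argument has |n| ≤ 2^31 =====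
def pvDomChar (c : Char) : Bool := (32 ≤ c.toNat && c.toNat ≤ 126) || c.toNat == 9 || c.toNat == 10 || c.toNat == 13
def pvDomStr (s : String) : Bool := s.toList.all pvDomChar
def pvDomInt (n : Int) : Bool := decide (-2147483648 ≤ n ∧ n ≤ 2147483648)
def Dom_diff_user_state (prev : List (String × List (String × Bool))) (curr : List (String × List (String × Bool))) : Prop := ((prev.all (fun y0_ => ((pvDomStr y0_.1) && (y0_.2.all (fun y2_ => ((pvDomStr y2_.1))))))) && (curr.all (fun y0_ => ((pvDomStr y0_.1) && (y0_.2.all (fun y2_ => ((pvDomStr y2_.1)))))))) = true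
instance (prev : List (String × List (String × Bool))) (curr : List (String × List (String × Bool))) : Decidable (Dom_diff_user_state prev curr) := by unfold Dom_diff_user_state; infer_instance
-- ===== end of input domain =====

-- B replaces A's three set differences/intersections, each sorted and looped separately, by ONE sorted pass
-- over the union of the key sets that routes every name by membership into three accumulator lists (alternative decomposition).
-- Both Pythons raise KeyError when a common user's states differ but lack "subscribed"; Pre_ excludes exactly that.

-- the Python dict arguments as PySem dicts (duplicate keys in the list overwrite in place, like dict construction)
def pvDictOf (m : List (String × List (String × Bool))) : PySem.Dict String (PySem.Dict String Bool) :=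
  PySem.Dict.ofList (m.map (fun p => (p.1, PySem.Dict.ofList p.2)))

-- Python '==' on str->bool dicts: same key set and same value at every key (insertion order ignored)
def pvDictPyEq (d e : PySem.Dict String Bool) : Bool :=
  d.keys.all (fun k => d.get? k == e.get? k) && e.keys.all (fun k => d.contains k)

-- ===== PORT A =====
def diff_user_state (prev : List (String × List (String × Bool))) (curr : List (String × List (String × Bool))) : List (String × String × Option String) :=
  let prevD := pvDictOf prev
  let currD := pvDictOf curr
  let changes : List (String × String × Option String) := []
  let added := PySem.Set.diff (PySem.Set.ofList currD.keys) (PySem.Set.ofList prevD.keys)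
  let removed := PySem.Set.diff (PySem.Set.ofList prevD.keys) (PySem.Set.ofList currD.keys)
  let common := PySem.Set.inter (PySem.Set.ofList currD.keys) (PySem.Set.ofList prevD.keys)
  let changes := (PySem.List.sorted added (fun x => x)).foldl
    (fun acc name => acc ++ [("added", name, (none : Option String))]) changes
  let changes := (PySem.List.sorted removed (fun x => x)).foldl
    (fun acc name => acc ++ [("removed", name, (none : Option String))]) changes
  let changes := (PySem.List.sorted common (fun x => x)).foldl
    (fun acc name =>
      if !(pvDictPyEq (currD.getD name PySem.Dict.empty) (prevD.getD name PySem.Dict.empty)) then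
        -- prev[name]["subscribed"] / curr[name]["subscribed"]: Pre_ guarantees the key is present
        -- exactly where this branch is reached; '.getD false' is the total form of that lookup
        let old_sub := ((prevD.getD name PySem.Dict.empty).get? "subscribed").getD false
        let new_sub := ((currD.getD name PySem.Dict.empty).get? "subscribed").getD false
        if new_sub && !old_sub then acc ++ [("subscribed", name, (none : Option String))]
        else if old_sub && !new_sub then acc ++ [("unsubscribed", name, (none : Option String))]
        else acc ++ [("changed", name, (none : Option String))]
      else acc) changes
  changes

-- ===== PORT B =====
-- _classify(pd, cd) of Source B ('.getD false' is the total form of the "subscribed" lookup; Pre_ guards it)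
def pvClassify (pd cd : PySem.Dict String Bool) : String :=
  let old_sub := (pd.get? "subscribed").getD false
  let new_sub := (cd.get? "subscribed").getD false
  if new_sub && !old_sub then "subscribed"
  else if old_sub && !new_sub then "unsubscribed"
  else "changed"

-- the body of Source B's single loop: route name into one of the three accumulators
def pvStep (prevD currD : PySem.Dict String (PySem.Dict String Bool))
    (acc : List (String × String × Option String) × List (String × String × Option String) × List (String × String × Option String))
    (name : String) :
    List (String × String × Option String) × List (String × String × Option String) × List (String × String × Option String) :=
  if !(prevD.contains name) then (acc.1 ++ [("added", name, none)], acc.2.1, acc.2.2)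
  else if !(currD.contains name) then (acc.1, acc.2.1 ++ [("removed", name, none)], acc.2.2)
  else if !(pvDictPyEq (currD.getD name PySem.Dict.empty) (prevD.getD name PySem.Dict.empty)) then
    (acc.1, acc.2.1, acc.2.2 ++ [(pvClassify (prevD.getD name PySem.Dict.empty) (currD.getD name PySem.Dict.empty), name, none)])
  else acc

def diff_user_state_alt (prev : List (String × List (String × Bool))) (curr : List (String × List (String × Bool))) : List (String × String × Option String) :=
  let prevD := pvDictOf prev
  let currD := pvDictOf curr
  let names := PySem.List.sorted (PySem.Set.union (PySem.Set.ofList prevD.keys) (PySem.Set.ofList currD.keys)) (fun x => x)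
  let res := names.foldl (pvStep prevD currD) ([], [], [])
  res.1 ++ res.2.1 ++ res.2.2

-- ===== PRECONDITION & SPEC =====
-- Pre_ excludes exactly the inputs where Python A raises KeyError: a user present in both snapshots whose
-- two state dicts differ but where one of them has no "subscribed" key (Source B raises the same KeyError there).
def Pre_diff_user_state (prev : List (String × List (String × Bool))) (curr : List (String × List (String × Bool))) : Prop :=
  ∀ name ∈ (pvDictOf prev).keys, name ∈ (pvDictOf curr).keys →
    pvDictPyEq ((pvDictOf curr).getD name PySem.Dict.empty) ((pvDictOf prev).getD name PySem.Dict.empty) = false →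
    ((pvDictOf prev).getD name PySem.Dict.empty).contains "subscribed" = true ∧
    ((pvDictOf curr).getD name PySem.Dict.empty).contains "subscribed" = true
instance (prev : List (String × List (String × Bool))) (curr : List (String × List (String × Bool))) : Decidable (Pre_diff_user_state prev curr) := by unfold Pre_diff_user_state; infer_instance

def pvWitness_diff_user_state : (List (String × List (String × Bool))) × (List (String × List (String × Bool))) :=
  ([("alice", [("subscribed", true)])], [("alice", [("subscribed", false)]), ("bob", [("subscribed", true)])])

def Spec_diff_user_state (prev : List (String × List (String × Bool))) (curr : List (String × List (String × Bool))) (out : List (String × String × Option String)) : Prop := out = diff_user_state_alt prev curr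
instance (prev : List (String × List (String × Bool))) (curr : List (String × List (String × Bool))) (out : List (String × String × Option String)) : Decidable (Spec_diff_user_state prev curr out) := by unfold Spec_diff_user_state; infer_instance

-- ===== CLAIM (what is proved, stated in full; the proofs are below) =====
def Claim_equal_diff_user_state : Prop := ∀ (prev : List (String × List (String × Bool))) (curr : List (String × List (String × Bool))), Dom_diff_user_state prev curr → Pre_diff_user_state prev curr → Spec_diff_user_state prev curr (diff_user_state prev curr)

-- ===== LEMMAS AND PROOFS =====

-- B's triple-accumulator fold, characterised as three filter-and-map passes
lemma pvStep_foldl (prevD currD : PySem.Dict String (PySem.Dict String Bool)) (l : List String)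
    (a r c : List (String × String × Option String)) :
    l.foldl (pvStep prevD currD) (a, r, c) =
      (a ++ (l.filter (fun n => !prevD.contains n)).map (fun n => ("added", n, none)),
       r ++ (l.filter (fun n => prevD.contains n && !currD.contains n)).map (fun n => ("removed", n, none)),
       c ++ (l.filter (fun n => prevD.contains n && currD.contains n &&
               !(pvDictPyEq (currD.getD n PySem.Dict.empty) (prevD.getD n PySem.Dict.empty)))).map
             (fun n => (pvClassify (prevD.getD n PySem.Dict.empty) (currD.getD n PySem.Dict.empty), n, none))) := by
  induction l generalizing a r c with
  | nil => simp
  | cons x t ih =>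
    simp only [List.foldl_cons, List.filter_cons]
    by_cases h1 : prevD.contains x
    · by_cases h2 : currD.contains x
      · by_cases h3 : pvDictPyEq (currD.getD x PySem.Dict.empty) (prevD.getD x PySem.Dict.empty)
        · simp [pvStep, h1, h2, h3, ih]
        · simp [pvStep, h1, h2, h3, ih]
      · simp [pvStep, h1, h2, ih]
    · simp [pvStep, h1, ih]

-- sorted of a deduplicated sublist = filtering the sorted union
lemma sorted_filter_of_set (s u : List String) (p : String → Bool)
    (hs : s.Nodup) (hu : u.Nodup) (h : ∀ x, x ∈ s ↔ (x ∈ u ∧ p x = true)) :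
    PySem.List.sorted s (fun x => x) = (PySem.List.sorted u (fun x => x)).filter p := by
  have husort : (PySem.List.sorted u (fun x => x)).Nodup :=
    (PySem.List.sorted_perm u (fun x => x) false).nodup_iff.mpr hu
  apply PySem.List.sorted_eq_of_perm_of_pairwise_lt
  · rw [List.perm_ext_iff_of_nodup (husort.filter p) hs]
    intro x
    simp only [List.mem_filter, PySem.List.mem_sorted, h]
  · have hle := PySem.List.sorted_pairwise u (fun x => x)
    have hne : (PySem.List.sorted u (fun x => x)).Pairwise (fun a b => a ≠ b) := husort
    exact ((hle.and hne).imp (fun hab => lt_of_le_of_ne hab.1 hab.2)).filter p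

-- A's third loop body, rewritten so its appended element is a single mapped value
lemma bodyA_eq (prevD currD : PySem.Dict String (PySem.Dict String Bool)) :
    (fun (acc : List (String × String × Option String)) (name : String) =>
      if !(pvDictPyEq (currD.getD name PySem.Dict.empty) (prevD.getD name PySem.Dict.empty)) then
        let old_sub := ((prevD.getD name PySem.Dict.empty).get? "subscribed").getD false
        let new_sub := ((currD.getD name PySem.Dict.empty).get? "subscribed").getD false
        if new_sub && !old_sub then acc ++ [("subscribed", name, (none : Option String))]
        else if old_sub && !new_sub then acc ++ [("unsubscribed", name, (none : Option String))]
        else acc ++ [("changed", name, (none : Option String))]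
      else acc)
    = (fun acc name =>
      if !(pvDictPyEq (currD.getD name PySem.Dict.empty) (prevD.getD name PySem.Dict.empty)) then
        acc ++ [(pvClassify (prevD.getD name PySem.Dict.empty) (currD.getD name PySem.Dict.empty), name, none)]
      else acc) := by
  funext acc name
  simp only [pvClassify]
  split_ifs <;> rfl

lemma mem_keys_of_contains (d : PySem.Dict String (PySem.Dict String Bool)) (k : String) :
    d.contains k = true ↔ k ∈ d.keys := by
  rw [PySem.Dict.contains_eq_decide_mem_keys]; simp

theorem diff_user_state_eq_alt (prev curr : List (String × List (String × Bool))) :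
    diff_user_state prev curr = diff_user_state_alt prev curr := by
  unfold diff_user_state diff_user_state_alt
  simp only []
  set prevD := pvDictOf prev with hP
  set currD := pvDictOf curr with hC
  have hnp : prevD.keys.Nodup := PySem.Dict.nodup_keys_ofList _
  have hnc : currD.keys.Nodup := PySem.Dict.nodup_keys_ofList _
  have hnP : (PySem.Set.ofList prevD.keys).Nodup := PySem.Set.nodup_ofList _
  have hnC : (PySem.Set.ofList currD.keys).Nodup := PySem.Set.nodup_ofList _
  have hnU : (PySem.Set.union (PySem.Set.ofList prevD.keys) (PySem.Set.ofList currD.keys)).Nodup :=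
    PySem.Set.nodup_union _ _ hnP
  -- the three grouped passes of A, each as a filter of the sorted union
  have hadd : PySem.List.sorted (PySem.Set.diff (PySem.Set.ofList currD.keys) (PySem.Set.ofList prevD.keys)) (fun x => x)
      = (PySem.List.sorted (PySem.Set.union (PySem.Set.ofList prevD.keys) (PySem.Set.ofList currD.keys)) (fun x => x)).filter
          (fun n => !prevD.contains n) := by
    apply sorted_filter_of_set _ _ _ (PySem.Set.nodup_diff _ _ hnC) hnU
    intro x
    simp only [PySem.Set.mem_diff, PySem.Set.mem_union, PySem.Set.mem_ofList,
      Bool.not_eq_true', ← Bool.not_eq_true, mem_keys_of_contains]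
    tauto
  have hrem : PySem.List.sorted (PySem.Set.diff (PySem.Set.ofList prevD.keys) (PySem.Set.ofList currD.keys)) (fun x => x)
      = (PySem.List.sorted (PySem.Set.union (PySem.Set.ofList prevD.keys) (PySem.Set.ofList currD.keys)) (fun x => x)).filter
          (fun n => prevD.contains n && !currD.contains n) := by
    apply sorted_filter_of_set _ _ _ (PySem.Set.nodup_diff _ _ hnP) hnU
    intro x
    simp only [PySem.Set.mem_diff, PySem.Set.mem_union, PySem.Set.mem_ofList,
      Bool.and_eq_true, Bool.not_eq_true', ← Bool.not_eq_true, mem_keys_of_contains]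
    tauto
  have hcom : PySem.List.sorted (PySem.Set.inter (PySem.Set.ofList currD.keys) (PySem.Set.ofList prevD.keys)) (fun x => x)
      = (PySem.List.sorted (PySem.Set.union (PySem.Set.ofList prevD.keys) (PySem.Set.ofList currD.keys)) (fun x => x)).filter
          (fun n => prevD.contains n && currD.contains n) := by
    apply sorted_filter_of_set _ _ _ (PySem.Set.nodup_inter _ _ hnC) hnU
    intro x
    simp only [PySem.Set.mem_inter, PySem.Set.mem_union, PySem.Set.mem_ofList,
      Bool.and_eq_true, mem_keys_of_contains]
    tauto
  rw [bodyA_eq prevD currD, PySem.List.foldl_append_if, PySem.List.foldl_append_singleton_eq_map,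
    PySem.List.foldl_append_singleton_eq_map, pvStep_foldl, hadd, hrem, hcom, List.filter_filter]
  simp [Bool.and_assoc, Bool.and_comm]

-- ===== VERDICT (by name: the statement is the Claim_ definition above) =====
theorem diff_user_state_spec : Claim_equal_diff_user_state := by
  intro prev curr _ _
  unfold Spec_diff_user_state
  exact diff_user_state_eq_alt prev curr
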